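-- pv_equiv track=rewrite | github.com/Q-Bach/SSBI | A07/Kubach_Noel_07_02.py | trypsin
-- ===== SOURCE A (Python) =====
-- def trypsin(seq: str) -> []:
--     """
--     Function to predict the peptides resulting from a
--     tryptic digestion of a protein.
--     :param seq: input protein sequence
--     :return: List of peptides
--     """
--
--     seq = seq.upper()
--     peptides = []
--     prev_cut = -1
--     for i in range(len(seq)):
--         aa = seq[i]
--         aa_next = seq[i + 1] if i + 1 < len(seq) else ""
--         if (aa == "R" or aa == "K") and aa_next != "P":
--             peptides.append(seq[prev_cut + 1:i + 1])
--             prev_cut = i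
--     if prev_cut + 1 != len(seq):
--         peptides.append(seq[prev_cut + 1:])
--
--     return sorted(peptides, key=lambda x: len(x), reverse=True)
-- ===== SOURCE B (Python) =====
-- def trypsin(seq: str) -> []:
--     """Accumulator-based tryptic digest: build each peptide char by char
--     (no prev_cut index bookkeeping, no slicing), flush at cleavage sites."""
--     seq = seq.upper()
--     peptides = []
--     cur = []
--     for i, aa in enumerate(seq):
--         cur.append(aa)
--         if aa in "KR" and seq[i + 1:i + 2] != "P":
--             peptides.append("".join(cur))
--             cur = []
--     if cur:
--         peptides.append("".join(cur))
--     return sorted(peptides, key=len, reverse=True)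
-- ===== Notes on version B (the rewrite author's own statement) =====
-- stated objective: simpler
-- what changed: B replaces A's prev_cut index bookkeeping and repeated string slicing with a single accumulator that collects each peptide's characters and is flushed at every cleavage site.
import Mathlib
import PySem

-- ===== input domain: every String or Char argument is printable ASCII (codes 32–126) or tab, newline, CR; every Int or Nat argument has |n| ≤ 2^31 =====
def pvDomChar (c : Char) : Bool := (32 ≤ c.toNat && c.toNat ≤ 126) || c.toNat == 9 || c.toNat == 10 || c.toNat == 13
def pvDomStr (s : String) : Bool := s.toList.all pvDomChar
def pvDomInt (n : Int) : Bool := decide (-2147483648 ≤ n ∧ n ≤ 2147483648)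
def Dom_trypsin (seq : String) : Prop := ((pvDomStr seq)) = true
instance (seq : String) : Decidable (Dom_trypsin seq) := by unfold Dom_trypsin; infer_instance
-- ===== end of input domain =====

-- B replaces A's prev_cut index bookkeeping and repeated slicing with an accumulator of
-- the current peptide's characters, flushed at each cleavage site (objective: simpler).

-- ===== PORT A =====
-- Literal port of A: indexed loop over range(len(seq)) carrying (peptides, prev_cut);
-- seq[i] is always in range here, ported as pyGetD on the char list; Python's aa_next,
-- a 1-char string or "", is ported as Option Char (none = "").
def trypsin (seq : String) : List String :=
  let s := PySem.Str.upper seq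
  let n := PySem.Str.len s
  let st := (PySem.List.pyRange 0 n 1).foldl
    (fun (acc : List String × Int) i =>
      let aa := PySem.List.pyGetD s.toList i ' '
      let aaNext? : Option Char :=
        if i + 1 < n then some (PySem.List.pyGetD s.toList (i + 1) ' ') else none
      if (aa = 'R' ∨ aa = 'K') ∧ aaNext? ≠ some 'P' then
        (acc.1 ++ [PySem.Str.slice s (some (acc.2 + 1)) (some (i + 1))], i)
      else acc)
    ([], -1)
  let peptides :=
    if st.2 + 1 ≠ n then st.1 ++ [PySem.Str.slice s (some (st.2 + 1)) none] else st.1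
  PySem.List.sorted peptides (fun x => PySem.Str.len x) true

-- ===== PORT B =====
-- Literal port of B: for i, aa in enumerate(seq) carrying (peptides, cur);
-- cur.append(aa) / "".join(cur) is the List Char accumulator realised by String.ofList.
def trypsin_alt (seq : String) : List String :=
  let s := PySem.Str.upper seq
  let st := (PySem.List.enumerate s.toList).foldl
    (fun (acc : List String × List Char) p =>
      let cur := acc.2 ++ [p.2]
      if (p.2 = 'K' ∨ p.2 = 'R') ∧
          PySem.Str.slice s (some (p.1 + 1)) (some (p.1 + 2)) ≠ "P" then
        (acc.1 ++ [String.ofList cur], [])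
      else (acc.1, cur))
    ([], ([] : List Char))
  let peptides := if st.2 ≠ [] then st.1 ++ [String.ofList st.2] else st.1
  PySem.List.sorted peptides (fun x => PySem.Str.len x) true

-- ===== PRECONDITION & SPEC =====
def Spec_trypsin (seq : String) (out : List String) : Prop := out = trypsin_alt seq
instance (seq : String) (out : List String) : Decidable (Spec_trypsin seq out) := by
  unfold Spec_trypsin; infer_instance

-- ===== CLAIM (what is proved, stated in full; the proofs are below) =====
def Claim_equal_trypsin : Prop := ∀ (seq : String), Dom_trypsin seq → Spec_trypsin seq (trypsin seq)

-- ===== LEMMAS AND PROOFS =====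

-- Reference decomposition: the tryptic fragments of a char list, with `cur`
-- the characters accumulated since the last cut.
def segsGo (cur : List Char) : List Char → List (List Char)
  | [] => if cur = [] then [] else [cur]
  | a :: rest =>
      if (a = 'K' ∨ a = 'R') ∧ rest.head? ≠ some 'P' then
        (cur ++ [a]) :: segsGo [] rest
      else segsGo (cur ++ [a]) rest

-- A's loop body and "loop then final append", as named functions (defeq to the port's lambdas)
def stepA (s : String) (n : Int) (acc : List String × Int) (i : Int) : List String × Int :=
  let aa := PySem.List.pyGetD s.toList i ' '
  let aaNext? : Option Char :=
    if i + 1 < n then some (PySem.List.pyGetD s.toList (i + 1) ' ') else none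
  if (aa = 'R' ∨ aa = 'K') ∧ aaNext? ≠ some 'P' then
    (acc.1 ++ [PySem.Str.slice s (some (acc.2 + 1)) (some (i + 1))], i)
  else acc

def afin (s : String) (n k : Int) (st : List String × Int) : List String :=
  let r := (PySem.List.pyRange k n 1).foldl (stepA s n) st
  if r.2 + 1 ≠ n then r.1 ++ [PySem.Str.slice s (some (r.2 + 1)) none] else r.1

-- B's loop body and "loop then final append"
def stepB (s : String) (acc : List String × List Char) (p : Int × Char) : List String × List Char :=
  let cur := acc.2 ++ [p.2]
  if (p.2 = 'K' ∨ p.2 = 'R') ∧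
      PySem.Str.slice s (some (p.1 + 1)) (some (p.1 + 2)) ≠ "P" then
    (acc.1 ++ [String.ofList cur], [])
  else (acc.1, cur)

def bfin (s : String) (l : List Char) (k : Int) (st : List String × List Char) : List String :=
  let r := (PySem.List.enumerate l k).foldl (stepB s) st
  if r.2 ≠ [] then r.1 ++ [String.ofList r.2] else r.1

theorem string_eq_iff_toList (x y : String) : x = y ↔ x.toList = y.toList := by
  constructor
  · intro h; rw [h]
  · intro h
    have := congrArg String.ofList h
    simpa using this

theorem take_one_ne_P (l : List Char) : (l.take 1 ≠ ['P']) ↔ l.head? ≠ some 'P' := by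
  cases l <;> simp

theorem B_loop (s : String) : ∀ (rest : List Char) (k : Nat) (P : List String) (cur : List Char),
    s.toList.drop k = rest →
    bfin s rest (k : Int) (P, cur) = P ++ (segsGo cur rest).map String.ofList := by
  intro rest
  induction rest with
  | nil =>
      intro k P cur _
      unfold bfin segsGo
      simp only [PySem.List.enumerate_nil, List.foldl_nil]
      by_cases h : cur = [] <;> simp [h]
  | cons a rest ih =>
      intro k P cur hdrop
      have hdrop' : s.toList.drop (k + 1) = rest := by
        rw [show k + 1 = k + 1 from rfl, ← List.drop_drop, hdrop]; rfl
      have hslice : (PySem.Str.slice s (some ((k : Int) + 1)) (some ((k : Int) + 2)) ≠ "P")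
          ↔ rest.head? ≠ some 'P' := by
        simp only [ne_eq]
        rw [string_eq_iff_toList, PySem.Str.toList_slice, PySem.Chars.slice_eq_listSlice,
          PySem.List.slice_toNat s.toList (by omega) (by omega)]
        have h1 : ((k : Int) + 1).toNat = k + 1 := by omega
        have h2 : ((k : Int) + 2).toNat = k + 2 := by omega
        rw [h1, h2, hdrop', show k + 2 - (k + 1) = 1 by omega,
          show ("P" : String).toList = ['P'] from rfl]
        exact take_one_ne_P rest
      unfold bfin
      rw [PySem.List.enumerate_cons, List.foldl_cons]
      by_cases hc : (a = 'K' ∨ a = 'R') ∧ rest.head? ≠ some 'P'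
      · have hstep : stepB s (P, cur) ((k : Int), a)
            = (P ++ [String.ofList (cur ++ [a])], []) := by
          unfold stepB
          rw [if_pos ⟨hc.1, hslice.mpr hc.2⟩]
        rw [hstep]
        have := ih (k + 1) (P ++ [String.ofList (cur ++ [a])]) [] hdrop'
        unfold bfin at this
        rw [show ((k : Int) + 1) = ((k + 1 : Nat) : Int) by push_cast; ring, this]
        rw [segsGo, if_pos hc]
        simp
      · have hstep : stepB s (P, cur) ((k : Int), a) = (P, cur ++ [a]) := by
          unfold stepB
          rw [if_neg (fun h => hc ⟨h.1, hslice.mp h.2⟩)]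
        rw [hstep]
        have := ih (k + 1) P (cur ++ [a]) hdrop'
        unfold bfin at this
        rw [show ((k : Int) + 1) = ((k + 1 : Nat) : Int) by push_cast; ring, this]
        rw [segsGo, if_neg hc]

theorem A_loop (s : String) : ∀ (rest : List Char) (k : Nat) (P : List String) (pc : Int),
    s.toList.drop k = rest → 0 ≤ pc + 1 → pc + 1 ≤ (k : Int) →
    pc + 1 ≤ (s.toList.length : Int) →
    afin s (s.toList.length : Int) (k : Int) (P, pc)
      = P ++ (segsGo ((s.toList.take k).drop (pc + 1).toNat) rest).map String.ofList := by
  intro rest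
  induction rest with
  | nil =>
      intro k P pc hdrop h0 hk hlen
      have hle : s.toList.length ≤ k := List.drop_eq_nil_iff.mp hdrop
      unfold afin segsGo
      rw [PySem.List.pyRange_one_eq_nil (by exact_mod_cast Nat.cast_le.mpr hle)]
      simp only [List.foldl_nil, List.take_of_length_le hle]
      by_cases h : pc + 1 = (s.toList.length : Int)
      · have hnil : s.toList.drop (pc + 1).toNat = [] := by
          rw [List.drop_eq_nil_iff]; omega
        rw [if_neg (by simpa using h), hnil]
        simp
      · have hlt : (pc + 1).toNat < s.toList.length := by omega
        have hne : s.toList.drop (pc + 1).toNat ≠ [] := by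
          rw [ne_eq, List.drop_eq_nil_iff]; omega
        rw [if_pos (by simpa using h), if_neg hne]
        rw [PySem.Str.slice]
        simp only [PySem.Chars.slice_eq_listSlice]
        rw [PySem.List.slice_from s.toList h0]
        simp
  | cons a rest ih =>
      intro k P pc hdrop h0 hk hlen
      have hklt : k < s.toList.length := by
        by_contra h
        rw [List.drop_eq_nil_iff.mpr (by omega)] at hdrop
        exact absurd hdrop.symm (List.cons_ne_nil a rest)
      have hk? : s.toList[k]? = some a := by
        have := congrArg (fun l => l[0]?) hdrop
        simpa [List.getElem?_drop] using this
      have haa : PySem.List.pyGetD s.toList (k : Int) ' ' = a := by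
        rw [PySem.List.pyGetD_natCast]
        simp [List.getD, hk?]
      have hnext : (if (k : Int) + 1 < (s.toList.length : Int) then
            some (PySem.List.pyGetD s.toList ((k : Int) + 1) ' ') else none) = rest.head? := by
        have hdrop' : s.toList.drop (k + 1) = rest := by
          rw [← List.drop_drop, hdrop]; rfl
        cases rest with
        | nil =>
            have : s.toList.length ≤ k + 1 := List.drop_eq_nil_iff.mp hdrop'
            rw [if_neg (by exact_mod_cast (by omega : ¬ ((k:Int) + 1 < (s.toList.length : Int))))]
            rfl
        | cons b t =>
            have hlen2 : k + 1 < s.toList.length := by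
              by_contra h
              rw [List.drop_eq_nil_iff.mpr (by omega)] at hdrop'
              exact absurd hdrop'.symm (List.cons_ne_nil b t)
            have hb? : s.toList[k+1]? = some b := by
              have := congrArg (fun l => l[0]?) hdrop'
              simpa [List.getElem?_drop] using this
            rw [if_pos (by exact_mod_cast hlen2)]
            rw [show (k : Int) + 1 = ((k + 1 : Nat) : Int) by push_cast; ring,
              PySem.List.pyGetD_natCast]
            simp [List.getD, hb?]
      have hdrop' : s.toList.drop (k + 1) = rest := by
        rw [← List.drop_drop, hdrop]; rfl
      have hcur1 : (s.toList.take (k + 1)).drop (pc + 1).toNat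
          = (s.toList.take k).drop (pc + 1).toNat ++ [a] := by
        rw [List.take_add_one, hk?]
        exact List.drop_append_of_le_length (by rw [List.length_take]; omega)
      unfold afin
      rw [PySem.List.pyRange_one_cons (by exact_mod_cast hklt), List.foldl_cons]
      by_cases hc : (a = 'K' ∨ a = 'R') ∧ rest.head? ≠ some 'P'
      · have hstep : stepA s (s.toList.length : Int) (P, pc) (k : Int)
            = (P ++ [PySem.Str.slice s (some (pc + 1)) (some ((k : Int) + 1))], (k : Int)) := by
          unfold stepA
          rw [haa, hnext, if_pos ⟨Or.comm.mp hc.1, hc.2⟩]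
        rw [hstep]
        have hsl : PySem.Str.slice s (some (pc + 1)) (some ((k : Int) + 1))
            = String.ofList ((s.toList.take k).drop (pc + 1).toNat ++ [a]) := by
          rw [string_eq_iff_toList, PySem.Str.toList_slice, PySem.Chars.slice_eq_listSlice,
            PySem.List.slice_toNat s.toList h0 (by omega)]
          rw [← hcur1, List.drop_take]
          have : ((k : Int) + 1).toNat = k + 1 := by omega
          rw [this]
          simp
        have := ih (k + 1) (P ++ [PySem.Str.slice s (some (pc + 1)) (some ((k : Int) + 1))])
          (k : Int) hdrop' (by omega) (by push_cast; omega) (by exact_mod_cast (by omega))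
        unfold afin at this
        rw [show ((k + 1 : Nat) : Int) = (k : Int) + 1 by push_cast; ring] at this
        rw [this]
        have hnilcur : (s.toList.take (k + 1)).drop ((k : Int) + 1).toNat = [] := by
          rw [List.drop_eq_nil_iff, List.length_take]; omega
        rw [hnilcur, segsGo, if_pos hc, hsl]
        simp
      · have hstep : stepA s (s.toList.length : Int) (P, pc) (k : Int) = (P, pc) := by
          unfold stepA
          rw [haa, hnext, if_neg (fun h => hc ⟨Or.comm.mp h.1, h.2⟩)]
        rw [hstep]
        have := ih (k + 1) P pc hdrop' h0 (by push_cast; omega) hlen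
        unfold afin at this
        rw [show ((k + 1 : Nat) : Int) = (k : Int) + 1 by push_cast; ring] at this
        rw [this, hcur1, segsGo, if_neg hc]

theorem trypsin_eq_afin (seq : String) :
    trypsin seq = PySem.List.sorted
      (afin (PySem.Str.upper seq) (PySem.Str.len (PySem.Str.upper seq)) 0 ([], -1))
      (fun x => PySem.Str.len x) true := rfl

theorem trypsin_alt_eq_bfin (seq : String) :
    trypsin_alt seq = PySem.List.sorted
      (bfin (PySem.Str.upper seq) (PySem.Str.upper seq).toList 0 ([], []))
      (fun x => PySem.Str.len x) true := rfl

-- ===== VERDICT (by name: the statement is the Claim_ definition above) =====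
theorem trypsin_spec : Claim_equal_trypsin := by
  intro seq _
  unfold Spec_trypsin
  rw [trypsin_eq_afin, trypsin_alt_eq_bfin]
  have hA := A_loop (PySem.Str.upper seq) (PySem.Str.upper seq).toList 0 [] (-1)
    (by simp) (by omega) (by omega) (by exact_mod_cast (by omega : (0:Int) ≤ _))
  have hB := B_loop (PySem.Str.upper seq) (PySem.Str.upper seq).toList 0 [] [] (by simp)
  rw [PySem.Str.len_eq]
  simp only [Nat.cast_zero] at hA hB
  simp only [List.take_zero, List.drop_nil, neg_add_cancel, Int.toNat_zero] at hA
  rw [hA, hB]
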